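-- pv_equiv track=rewrite | github.com/EH-Fixer/EH-Fixer | EH-Fixer/EHFixer.py | searchPos
-- ===== SOURCE A (Python) =====
-- def searchPos(nums, target):
--     left = 0
--     right = len(nums)
--     while left < right:
--         middle = (left + right) // 2
--         if nums[middle] < target:
--             left = middle + 1
--         elif nums[middle] > target:
--             right = middle
--         else:
--             return middle
--     return right-1
-- ===== SOURCE B (Python) =====
-- def _search(seg, target, base):
--     # recursive binary search on a slice, carrying the slice's offset in the full list
--     if not seg:
--         return base - 1
--     m = len(seg) // 2
--     v = seg[m]
--     if v < target:
--         return _search(seg[m + 1:], target, base + m + 1)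
--     elif v > target:
--         return _search(seg[:m], target, base)
--     else:
--         return base + m
--
-- def searchPos(nums, target):
--     return _search(nums, target, 0)
-- ===== Notes on version B (the rewrite author's own statement) =====
-- stated objective: alternative
-- what changed: Replaces the index-pair while loop with a recursion on list slices: the helper receives the current sub-list and its base offset, halves the sub-list itself, and recurses on the left or right slice, so no left/right indices into the original list are maintained.
import Mathlib
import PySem

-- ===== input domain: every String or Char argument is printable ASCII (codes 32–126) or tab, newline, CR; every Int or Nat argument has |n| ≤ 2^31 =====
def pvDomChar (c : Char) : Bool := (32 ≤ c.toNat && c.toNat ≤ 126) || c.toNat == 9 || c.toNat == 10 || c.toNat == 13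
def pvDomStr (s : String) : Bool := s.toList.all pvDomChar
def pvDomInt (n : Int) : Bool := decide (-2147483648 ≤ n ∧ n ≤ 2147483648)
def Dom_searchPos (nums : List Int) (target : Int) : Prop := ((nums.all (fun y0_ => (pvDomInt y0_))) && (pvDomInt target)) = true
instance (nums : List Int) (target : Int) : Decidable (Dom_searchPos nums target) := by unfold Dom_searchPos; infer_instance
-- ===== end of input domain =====

-- B replaces A's index-pair while loop by a recursion on list slices carrying a base offset (objective: alternative, same result).

-- ===== PORT A =====
-- A's while loop over the state (left, right); nums[middle] is always in range along
-- the loop's path (0 ≤ left ≤ middle < right ≤ len), so the none branch is unreachable there.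
def searchPosLoop (nums : List Int) (target left right : Int) : Int :=
  if left < right then
    let middle := PySem.Int.floordiv (left + right) 2
    match PySem.List.pyGet? nums middle with
    | none => 0
    | some v =>
      if v < target then searchPosLoop nums target (middle + 1) right
      else if v > target then searchPosLoop nums target left middle
      else middle
  else right - 1
termination_by (right - left).toNat
decreasing_by
  all_goals
    rw [PySem.Int.floordiv_eq_ediv_of_pos (by omega : (0:Int) < 2)] at *
    omega

def searchPos (nums : List Int) (target : Int) : Int :=
  searchPosLoop nums target 0 (nums.length : Int)

-- ===== PORT B =====
-- B's helper: recursion on the current sub-list seg (a slice of the original list) with its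
-- base offset; seg[m] is always in range when seg is nonempty, so the none branch is unreachable.
def searchRec (seg : List Int) (target base : Int) : Int :=
  if seg.isEmpty then base - 1
  else
    let m : Nat := seg.length / 2   -- len(seg) // 2, exact: both operands are nonnegative
    match PySem.List.pyGet? seg (m : Int) with
    | none => 0
    | some v =>
      if v < target then searchRec (PySem.List.slice seg (some ((m : Int) + 1)) none) target (base + m + 1)
      else if v > target then searchRec (PySem.List.slice seg none (some (m : Int))) target base
      else base + m
termination_by seg.length
decreasing_by
  · rw [show (((seg.length / 2 : Nat) : Int) + 1) = ((seg.length / 2 + 1 : Nat) : Int) by push_cast; ring,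
      PySem.List.slice_from_natCast]
    simp_all [← List.length_pos_iff]
  · rw [PySem.List.slice_to_natCast]
    simp_all [← List.length_pos_iff]
    omega

def searchPos_alt (nums : List Int) (target : Int) : Int :=
  searchRec nums target 0

-- ===== PRECONDITION & SPEC =====
def Spec_searchPos (nums : List Int) (target : Int) (out : Int) : Prop := out = searchPos_alt nums target
instance (nums : List Int) (target : Int) (out : Int) : Decidable (Spec_searchPos nums target out) := by unfold Spec_searchPos; infer_instance

-- ===== CLAIM (what is proved, stated in full; the proofs are below) =====
def Claim_equal_searchPos : Prop := ∀ (nums : List Int) (target : Int), Dom_searchPos nums target → Spec_searchPos nums target (searchPos nums target)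

-- ===== LEMMAS AND PROOFS =====

-- Loop/recursion correspondence: B's helper on the window nums[left:right] (with base = left)
-- computes exactly A's loop on the state (left, right).
lemma searchRec_eq_loop (n : Nat) (nums : List Int) (target left right : Int)
    (hl : 0 ≤ left) (hlr : left ≤ right) (hr : right ≤ (nums.length : Int))
    (hn : n = (right - left).toNat) :
    searchRec ((nums.drop left.toNat).take n) target left = searchPosLoop nums target left right := by
  induction n using Nat.strong_induction_on generalizing left right with
  | _ n ih =>
    rw [searchRec, searchPosLoop]
    by_cases hcmp : left < right
    · have hn0 : 0 < n := by omega
      have hseglen : ((nums.drop left.toNat).take n).length = n := by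
        simp; omega
      have hne : ((nums.drop left.toNat).take n).isEmpty = false := by
        simp only [List.isEmpty_eq_false_iff, ← List.length_pos_iff, hseglen]; omega
      rw [hne]
      simp only [Bool.false_eq_true, if_false, hseglen]
      have hmid : PySem.Int.floordiv (left + right) 2 = ((left.toNat + n / 2 : Nat) : Int) := by
        rw [PySem.Int.floordiv_eq_ediv_of_pos (by omega : (0:Int) < 2)]
        omega
      have hgetB : PySem.List.pyGet? ((nums.drop left.toNat).take n) ((n / 2 : Nat) : Int)
          = nums[left.toNat + n / 2]? := by
        rw [PySem.List.pyGet?_natCast]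
        rw [List.getElem?_take_of_lt (by omega), List.getElem?_drop]
      have hgetA : PySem.List.pyGet? nums (PySem.Int.floordiv (left + right) 2)
          = nums[left.toNat + n / 2]? := by
        rw [hmid, PySem.List.pyGet?_natCast]
      rw [if_pos hcmp, hgetB, hgetA]
      cases hv : nums[left.toNat + n / 2]? with
      | none => rfl
      | some v =>
        dsimp only
        by_cases h1 : v < target
        · rw [if_pos h1, if_pos h1]
          have hslice : PySem.List.slice ((nums.drop left.toNat).take n) (some ((n / 2 : Nat) + 1 : Int)) none
              = (nums.drop (left.toNat + (n / 2 + 1))).take (n - (n / 2 + 1)) := by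
            have : ((n / 2 : Nat) + 1 : Int) = ((n / 2 + 1 : Nat) : Int) := by push_cast; ring
            rw [this, PySem.List.slice_from_natCast, List.drop_take, List.drop_drop]
          have harg : left + ((n / 2 : Nat) : Int) + 1 = PySem.Int.floordiv (left + right) 2 + 1 := by
            rw [hmid]; omega
          have hnewl : (PySem.Int.floordiv (left + right) 2 + 1).toNat = left.toNat + (n / 2 + 1) := by
            rw [hmid]; omega
          rw [hslice, harg]
          have := ih (n - (n / 2 + 1)) (by omega) (PySem.Int.floordiv (left + right) 2 + 1) right
            (by rw [hmid]; omega) (by rw [hmid]; omega) hr (by rw [hmid]; omega)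
          rw [hnewl] at this
          exact this
        · rw [if_neg h1, if_neg h1]
          by_cases h2 : v > target
          · rw [if_pos h2, if_pos h2]
            have hslice : PySem.List.slice ((nums.drop left.toNat).take n) none (some ((n / 2 : Nat) : Int))
                = (nums.drop left.toNat).take (n / 2) := by
              rw [PySem.List.slice_to_natCast, List.take_take]
              congr 1
              omega
            rw [hslice]
            have := ih (n / 2) (by omega) left (PySem.Int.floordiv (left + right) 2)
              hl (by rw [hmid]; omega) (by rw [hmid]; omega) (by rw [hmid]; omega)
            exact this
          · rw [if_neg h2, if_neg h2, hmid]
            omega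
    · rw [if_neg hcmp]
      have : n = 0 := by omega
      subst this
      rw [List.take_zero]
      unfold searchRec
      simp only [List.isEmpty_nil, if_pos]
      omega

-- ===== VERDICT (by name: the statement is the Claim_ definition above) =====
theorem searchPos_spec : Claim_equal_searchPos := by
  intro nums target _
  unfold Spec_searchPos searchPos searchPos_alt
  have := searchRec_eq_loop nums.length nums target 0 (nums.length : Int)
    le_rfl (by omega) le_rfl (by omega)
  simpa using this.symm
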